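-- pv_equiv track=rewrite | github.com/redhorn144/RBF-PU-RA | quadtest/NNLS.py | monomial_exponents
-- ===== SOURCE A (Python) =====
-- def monomial_exponents(dim, degree):
--     """
--     List of multi-index tuples (a_0,...,a_{dim-1}) with sum ≤ degree,
--     in graded lexicographic order.  Supports dim = 1, 2, 3.
--     """
--     exps = []
--     if dim == 1:
--         for d in range(degree + 1):
--             exps.append((d,))
--     elif dim == 2:
--         for total in range(degree + 1):
--             for a in range(total + 1):
--                 exps.append((a, total - a))
--     elif dim == 3:
--         for total in range(degree + 1):
--             for a in range(total + 1):
--                 for b in range(total - a + 1):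
--                     exps.append((a, b, total - a - b))
--     else:
--         raise ValueError(f"dim must be 1, 2, or 3; got {dim}")
--     return exps
-- ===== SOURCE B (Python) =====
-- def monomial_exponents(dim, degree):
--     """
--     List of multi-index tuples (a_0,...,a_{dim-1}) with sum <= degree,
--     in graded lexicographic order.  Supports dim = 1, 2, 3.
--     """
--     if dim not in (1, 2, 3):
--         raise ValueError(f"dim must be 1, 2, or 3; got {dim}")
--
--     def parts(k, t):
--         # all length-k tuples of nonnegative ints summing to exactly t,
--         # first coordinate ascending
--         if k == 1:
--             return [(t,)]
--         return [(a,) + p for a in range(t + 1) for p in parts(k - 1, t - a)]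
--
--     exps = []
--     for total in range(degree + 1):
--         exps.extend(parts(dim, total))
--     return exps
-- ===== Notes on version B (the rewrite author's own statement) =====
-- stated objective: alternative
-- what changed: Replaces the three hard-coded per-dimension nested-loop branches with one recursive compositions helper parts(k, t) enumerating all length-k tuples summing to t, concatenated across totals.
import Mathlib
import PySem

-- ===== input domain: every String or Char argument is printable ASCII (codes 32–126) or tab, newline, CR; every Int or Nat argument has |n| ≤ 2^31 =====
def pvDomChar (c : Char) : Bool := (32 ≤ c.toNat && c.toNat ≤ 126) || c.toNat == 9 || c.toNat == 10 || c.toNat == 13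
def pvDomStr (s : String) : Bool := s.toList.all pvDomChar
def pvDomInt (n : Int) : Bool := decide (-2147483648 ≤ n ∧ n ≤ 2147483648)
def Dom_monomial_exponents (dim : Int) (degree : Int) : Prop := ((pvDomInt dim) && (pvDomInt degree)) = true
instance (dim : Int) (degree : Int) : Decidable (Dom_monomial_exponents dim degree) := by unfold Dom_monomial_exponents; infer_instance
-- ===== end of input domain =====

-- B replaces A's three hard-coded per-dimension nested loops with one recursive
-- compositions helper; same output, same domain (alternative decomposition).
-- ===== PORT A =====
def monomial_exponents (dim : Int) (degree : Int) : List (List Int) :=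
  if dim = 1 then
    (PySem.List.pyRange 0 (degree + 1) 1).foldl (fun exps d => exps ++ [[d]]) []
  else if dim = 2 then
    (PySem.List.pyRange 0 (degree + 1) 1).foldl (fun exps total =>
      (PySem.List.pyRange 0 (total + 1) 1).foldl (fun exps a =>
        exps ++ [[a, total - a]]) exps) []
  else if dim = 3 then
    (PySem.List.pyRange 0 (degree + 1) 1).foldl (fun exps total =>
      (PySem.List.pyRange 0 (total + 1) 1).foldl (fun exps a =>
        (PySem.List.pyRange 0 (total - a + 1) 1).foldl (fun exps b =>
          exps ++ [[a, b, total - a - b]]) exps) exps) []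
  else []  -- Python raises ValueError here; excluded by Pre_

-- ===== PORT B =====
-- parts(k, t): all length-k lists of nonnegative ints summing to t, first coord ascending.
-- (k = 0 is unreachable under the dim guard; returning [] there merely totalizes.)
def pvParts : Nat → Int → List (List Int)
  | 0, _ => []
  | 1, t => [[t]]
  | k + 2, t =>
      (PySem.List.pyRange 0 (t + 1) 1).flatMap fun a =>
        (pvParts (k + 1) (t - a)).map fun p => a :: p

def monomial_exponents_alt (dim : Int) (degree : Int) : List (List Int) :=
  if dim = 1 ∨ dim = 2 ∨ dim = 3 then
    (PySem.List.pyRange 0 (degree + 1) 1).foldl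
      (fun exps total => exps ++ pvParts dim.toNat total) []
  else []  -- Python raises ValueError here; excluded by Pre_

-- ===== PRECONDITION & SPEC =====
-- Pre_ excludes exactly the inputs on which A (and B) raise ValueError: dim outside {1, 2, 3}.
def Pre_monomial_exponents (dim : Int) (degree : Int) : Prop := dim = 1 ∨ dim = 2 ∨ dim = 3
instance (dim : Int) (degree : Int) : Decidable (Pre_monomial_exponents dim degree) := by unfold Pre_monomial_exponents; infer_instance
def pvWitness_monomial_exponents : Int × Int := (2, 3)
def Spec_monomial_exponents (dim : Int) (degree : Int) (out : List (List Int)) : Prop := out = monomial_exponents_alt dim degree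
instance (dim : Int) (degree : Int) (out : List (List Int)) : Decidable (Spec_monomial_exponents dim degree out) := by unfold Spec_monomial_exponents; infer_instance

-- ===== CLAIM (what is proved, stated in full; the proofs are below) =====
def Claim_equal_monomial_exponents : Prop := ∀ (dim : Int) (degree : Int), Dom_monomial_exponents dim degree → Pre_monomial_exponents dim degree → Spec_monomial_exponents dim degree (monomial_exponents dim degree)

-- ===== LEMMAS AND PROOFS =====
theorem pvParts_one : pvParts 1 = fun t : Int => ([[t]] : List (List Int)) :=
  funext fun _ => rfl

theorem pvParts_two : pvParts (Int.toNat 2) = fun t : Int =>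
    (List.map (fun a => ([[a, t - a]] : List (List Int))) (PySem.List.pyRange 0 (t + 1))).flatten :=
  funext fun t => by simp [pvParts, List.flatMap_def]

theorem pvParts_three : pvParts (Int.toNat 3) = fun t : Int =>
    (List.map (fun a =>
      (List.map (fun b => ([[a, b, t - a - b]] : List (List Int)))
        (PySem.List.pyRange 0 (t - a + 1))).flatten)
      (PySem.List.pyRange 0 (t + 1))).flatten :=
  funext fun t => by simp [pvParts, List.flatMap_def, Function.comp_def]

-- ===== VERDICT (by name: the statement is the Claim_ definition above) =====
theorem monomial_exponents_spec : Claim_equal_monomial_exponents := by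
  intro dim degree _ hpre
  unfold Spec_monomial_exponents monomial_exponents monomial_exponents_alt
  rcases hpre with h | h | h <;> subst h
  · norm_num [pvParts_one]
  · norm_num [pvParts_two]
  · norm_num [pvParts_three]
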